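-- pv_equiv track=rewrite | github.com/bemistape/ztimeline | scripts/refresh_airtable_data.py | compute_headers
-- ===== SOURCE A (Python) =====
-- from typing import Any, Iterable
--
-- def compute_headers(records: Iterable[dict[str, Any]], preferred_headers: list[str] | None = None) -> list[str]:
--     preferred = preferred_headers or []
--     seen: set[str] = set(preferred)
--     extras: list[str] = []
--     for record in records:
--         fields = record.get("fields", {})
--         for key in fields.keys():
--             if key in seen:
--                 continue
--             seen.add(key)
--             extras.append(key)
--     return preferred + extras
-- ===== SOURCE B (Python) =====
-- def compute_headers(records, preferred_headers=None):
--     preferred = preferred_headers or []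
--     flat = [k for record in records for k in record.get("fields", {})]
--     extras = [k for i, k in enumerate(flat)
--               if k not in preferred and k not in flat[:i]]
--     return preferred + extras
-- ===== Notes on version B (the rewrite author's own statement) =====
-- stated objective: alternative
-- what changed: Replaces A's fused seen-set check-then-append loop by a set-free two-stage pipeline: flatten all field keys, then keep a key at position i exactly when it is not preferred and does not occur earlier in the flattened list (first-occurrence test by prefix-slice membership).
import Mathlib
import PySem

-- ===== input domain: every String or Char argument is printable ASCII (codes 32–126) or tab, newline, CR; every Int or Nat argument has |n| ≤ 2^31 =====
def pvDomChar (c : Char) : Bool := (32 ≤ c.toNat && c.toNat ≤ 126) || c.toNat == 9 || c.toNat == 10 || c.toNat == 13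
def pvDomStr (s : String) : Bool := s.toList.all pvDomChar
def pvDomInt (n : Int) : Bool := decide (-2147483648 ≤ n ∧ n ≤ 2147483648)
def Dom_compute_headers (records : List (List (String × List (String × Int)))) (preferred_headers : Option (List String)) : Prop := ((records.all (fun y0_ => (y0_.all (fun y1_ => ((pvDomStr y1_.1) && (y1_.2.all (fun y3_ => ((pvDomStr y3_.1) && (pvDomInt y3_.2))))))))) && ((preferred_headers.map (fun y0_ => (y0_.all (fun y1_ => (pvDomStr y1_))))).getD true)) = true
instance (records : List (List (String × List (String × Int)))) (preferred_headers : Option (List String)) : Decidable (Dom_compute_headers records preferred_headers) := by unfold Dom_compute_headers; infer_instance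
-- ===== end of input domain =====

-- B drops A's mutable seen-set entirely: it flattens all field keys, then keeps a key at
-- position i iff it is not preferred and does not occur in the prefix before i (alternative
-- set-free decomposition; quadratic instead of linear, not claimed faster).

-- ===== PORT A =====
def compute_headers (records : List (List (String × List (String × Int)))) (preferred_headers : Option (List String)) : List String :=
  let preferred : List String :=
    match preferred_headers with
    | none => []
    | some l => if l.isEmpty then [] else l
  let st :=
    records.foldl
      (fun (st : PySem.Set String × List String) record =>
        let fields := PySem.Dict.getD (PySem.Dict.mk record) "fields" []
        (PySem.Dict.mk fields).keys.foldl
          (fun st key =>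
            if PySem.Set.contains st.1 key then st
            else (PySem.Set.add st.1 key, st.2 ++ [key])) st)
      (PySem.Set.ofList preferred, [])
  preferred ++ st.2

-- ===== PORT B =====
def compute_headers_alt (records : List (List (String × List (String × Int)))) (preferred_headers : Option (List String)) : List String :=
  let preferred : List String :=
    match preferred_headers with
    | none => []
    | some l => if l.isEmpty then [] else l
  let flat := records.flatMap
    (fun record => (PySem.Dict.mk (PySem.Dict.getD (PySem.Dict.mk record) "fields" [])).keys)
  let extras := ((PySem.List.enumerate flat).filter
      (fun ik => !(preferred.contains ik.2) && !((PySem.List.slice flat none (some ik.1)).contains ik.2))).map (·.2)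
  preferred ++ extras

-- ===== PRECONDITION & SPEC =====
def Spec_compute_headers (records : List (List (String × List (String × Int)))) (preferred_headers : Option (List String)) (out : List String) : Prop := out = compute_headers_alt records preferred_headers
instance (records : List (List (String × List (String × Int)))) (preferred_headers : Option (List String)) (out : List String) : Decidable (Spec_compute_headers records preferred_headers out) := by unfold Spec_compute_headers; infer_instance

-- ===== CLAIM (what is proved, stated in full; the proofs are below) =====
def Claim_equal_compute_headers : Prop := ∀ (records : List (List (String × List (String × Int)))) (preferred_headers : Option (List String)), Dom_compute_headers records preferred_headers → Spec_compute_headers records preferred_headers (compute_headers records preferred_headers)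

-- ===== LEMMAS AND PROOFS =====

-- Invariant: A's fold over the remaining keys, started with a seen set whose membership is
-- "preferred or in the already-processed prefix `done`", appends exactly the keys of `rest`
-- that B's enumerate/prefix-slice filter keeps (indices offset by done.length).
theorem foldG (pref : List String) :
    ∀ (rest done s acc : List String),
    (∀ k, s.contains k = (pref.contains k || done.contains k)) →
    (rest.foldl
      (fun (st : PySem.Set String × List String) key =>
        if PySem.Set.contains st.1 key then st
        else (PySem.Set.add st.1 key, st.2 ++ [key])) (s, acc)).2
    = acc ++ ((PySem.List.enumerate rest (done.length : Int)).filter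
        (fun ik => !(pref.contains ik.2)
          && !((PySem.List.slice (done ++ rest) none (some ik.1)).contains ik.2))).map (·.2) := by
  intro rest
  induction rest with
  | nil => intro done s acc _; simp [PySem.List.enumerate]
  | cons k t ih =>
    intro done s acc hs
    have hslice0 : PySem.List.slice (done ++ k :: t) none (some (done.length : Int)) = done := by
      rw [PySem.List.slice_to_natCast]; exact List.take_left
    have hlen : ((done ++ [k]).length : Int) = (done.length : Int) + 1 := by simp
    have hassoc : (done ++ [k]) ++ t = done ++ k :: t := by simp
    rw [PySem.List.enumerate_cons, List.foldl_cons]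
    by_cases hk : PySem.Set.contains s k = true
    · -- k already seen: A skips it and B's filter drops it (k ∈ pref or k ∈ done)
      have hk' : s.contains k = true := by simpa using hk
      have hb : (pref.contains k || done.contains k) = true := by rw [← hs k]; exact hk'
      have hcond : (!(pref.contains k) && !((PySem.List.slice (done ++ k :: t) none
          (some (done.length : Int))).contains k)) = false := by
        rw [hslice0]
        rcases Bool.or_eq_true_iff.mp hb with h | h
        · have hm : k ∈ pref := by simpa using h
          simp [hm]
        · have hm : k ∈ done := by simpa using h
          simp [hm]
      have hs' : ∀ k', s.contains k' = (pref.contains k' || (done ++ [k]).contains k') := by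
        intro k'
        by_cases hkk : k' = k
        · subst hkk; rw [hk']; simp
        · have h2 : (done ++ [k]).contains k' = done.contains k' := by simp [hkk]
          rw [h2, hs k']
      have hIH := ih (done ++ [k]) s acc hs'
      rw [hlen, hassoc] at hIH
      rw [if_pos hk, List.filter_cons_of_neg (by simpa using hcond)]
      exact hIH
    · -- k new: A appends it and B's filter keeps it
      have hcont : s.contains k = false := by
        have : ¬ s.contains k = true := by simpa using hk
        exact Bool.not_eq_true _ ▸ eq_false_of_ne_true this
      have hnp : pref.contains k = false := by
        have := hs k; rw [hcont] at this
        exact (Bool.or_eq_false_iff.mp this.symm).1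
      have hnd : done.contains k = false := by
        have := hs k; rw [hcont] at this
        exact (Bool.or_eq_false_iff.mp this.symm).2
      have hcond : (!(pref.contains k) && !((PySem.List.slice (done ++ k :: t) none
          (some (done.length : Int))).contains k)) = true := by
        rw [hslice0, hnp, hnd]; rfl
      have hadd : PySem.Set.add s k = s ++ [k] := by
        have hmem : k ∉ s := by simpa using hcont
        simp [PySem.Set.add, hmem]
      have hs' : ∀ k', (s ++ [k]).contains k' = (pref.contains k' || (done ++ [k]).contains k') := by
        intro k'
        by_cases hkk : k' = k
        · subst hkk; simp
        · have h1 : (s ++ [k]).contains k' = s.contains k' := by simp [hkk]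
          have h2 : (done ++ [k]).contains k' = done.contains k' := by simp [hkk]
          rw [h1, h2, hs k']
      have hIH := ih (done ++ [k]) (s ++ [k]) (acc ++ [k]) hs'
      rw [hlen, hassoc] at hIH
      rw [if_neg hk, hadd, List.filter_cons_of_pos (by simpa using hcond), List.map_cons, hIH]
      simp

-- ===== VERDICT (by name: the statement is the Claim_ definition above) =====
theorem compute_headers_spec : Claim_equal_compute_headers := by
  intro records preferred_headers hD
  clear hD
  unfold Spec_compute_headers compute_headers compute_headers_alt
  simp only [← List.foldl_flatMap]
  rw [foldG (match preferred_headers with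
        | none => ([] : List String)
        | some l => if l.isEmpty then [] else l)
      (records.flatMap
        (fun record => (PySem.Dict.mk (PySem.Dict.getD (PySem.Dict.mk record) "fields" [])).keys))
      [] _ []
      (by intro k; simp [PySem.Set.mem_ofList])]
  simp
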